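-- pv_equiv track=rewrite | github.com/herbertlohmus/herbertlohmus.github.io | youtubedl.py | compile_italic_underscore
-- ===== SOURCE A (Python) =====
-- def compile_italic_underscore(line):
--     '''
--     Convert "_italic_" into "<i>italic</i>".
--     HINT:
--     This function is almost exactly the same as `compile_italic_star`.
--     >>> compile_italic_underscore('_This is italic!_ This is not italic.')
--     '<i>This is italic!</i> This is not italic.'
--     >>> compile_italic_underscore('_This is italic!_')
--     '<i>This is italic!</i>'
--     >>> compile_italic_underscore('This is _italic_!')
--     'This is <i>italic</i>!'
--     >>> compile_italic_underscore('This is not _italic!')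
--     'This is not _italic!'
--     >>> compile_italic_underscore('_')
--     '_'
--     '''
--     start_index = None
--     stop_index = None
--     for i in range(len(line)):
--         if line[i] == '_':
--             if start_index is None:
--                 start_index = i
--             else:
--                 stop_index = i
--
--     if start_index is not None and stop_index is not None:
--         new_line = line[:start_index] + '<i>' + line[start_index +
--                                                      1:stop_index] + '</i>' + line[stop_index+1:]
--     else:
--         new_line = line
--
--     return new_line
-- ===== SOURCE B (Python) =====
-- def compile_italic_underscore(line):
--     parts = line.split('_')
--     if len(parts) < 3:
--         return line
--     return parts[0] + '<i>' + '_'.join(parts[1:-1]) + '</i>' + parts[-1]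
-- ===== Notes on version B (the rewrite author's own statement) =====
-- stated objective: faster
-- what changed: Instead of scanning indices to locate the first and last underscore and slicing, B splits the line into the list of underscore-separated segments and reassembles it: first segment, opening tag, the interior segments rejoined with underscores, closing tag, last segment.
import Mathlib
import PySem

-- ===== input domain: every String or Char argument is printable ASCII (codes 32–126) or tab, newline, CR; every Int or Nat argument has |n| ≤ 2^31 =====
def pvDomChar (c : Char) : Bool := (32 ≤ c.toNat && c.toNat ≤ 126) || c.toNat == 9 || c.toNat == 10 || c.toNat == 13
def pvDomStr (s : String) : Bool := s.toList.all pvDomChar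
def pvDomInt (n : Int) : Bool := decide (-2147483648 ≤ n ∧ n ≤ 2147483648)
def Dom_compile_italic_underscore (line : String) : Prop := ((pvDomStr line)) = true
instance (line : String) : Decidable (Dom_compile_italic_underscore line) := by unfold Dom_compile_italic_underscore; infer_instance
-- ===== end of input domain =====

-- B splits the line into underscore-separated segments and reassembles them (first segment,
-- '<i>', interior segments rejoined with '_', '</i>', last segment) instead of A's
-- index-tracking scan plus slicing; return value only, no mutation.

-- ===== PORT A =====
-- the 'for i in range(len(line))' loop: structural recursion over the characters carrying
-- the current index i and the (start_index, stop_index) state; i stays in [0, len), so Nat is exact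
def pvAScan : List Char → Nat → Option Nat × Option Nat → Option Nat × Option Nat
  | [], _, st => st
  | c :: rest, i, (s, t) =>
      if c = '_' then
        match s with
        | none => pvAScan rest (i+1) (some i, t)
        | some _ => pvAScan rest (i+1) (s, some i)
      else pvAScan rest (i+1) (s, t)

def compile_italic_underscore (line : String) : String :=
  match pvAScan line.toList 0 (none, none) with
  | (some s, some t) =>
      -- line[:s] / line[s+1:t] / line[t+1:]; s < t ≤ len here, so the Python slices are these take/drop
      String.ofList (line.toList.take s ++ "<i>".toList
        ++ ((line.toList.drop (s+1)).take (t - (s+1))) ++ "</i>".toList ++ line.toList.drop (t+1))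
  | _ => line

-- ===== PORT B =====
-- line.split('_'): the list of segments between underscores (always nonempty)
def pvSplit : List Char → List (List Char)
  | [] => [[]]
  | c :: cs =>
      if c = '_' then [] :: pvSplit cs
      else
        match pvSplit cs with
        | [] => [[c]]        -- unreachable (pvSplit is never empty), kept for totality
        | p :: ps => (c :: p) :: ps

-- '_'.join(parts)
def pvJoinU : List (List Char) → List Char
  | [] => []
  | [p] => p
  | p :: q :: ps => p ++ '_' :: pvJoinU (q :: ps)

def compile_italic_underscore_alt (line : String) : String :=
  -- parts = line.split('_'); if len(parts) < 3: return line
  -- else parts[0] + '<i>' + '_'.join(parts[1:-1]) + '</i>' + parts[-1]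
  if (pvSplit line.toList).length < 3 then line
  else
    String.ofList ((pvSplit line.toList).headD [] ++ "<i>".toList
      ++ pvJoinU ((pvSplit line.toList).drop 1).dropLast ++ "</i>".toList
      ++ (pvSplit line.toList).getLastD [])

-- ===== PRECONDITION & SPEC =====
def Spec_compile_italic_underscore (line : String) (out : String) : Prop := out = compile_italic_underscore_alt line
instance (line : String) (out : String) : Decidable (Spec_compile_italic_underscore line out) := by unfold Spec_compile_italic_underscore; infer_instance

-- ===== CLAIM =====
def Claim_equal_compile_italic_underscore : Prop := ∀ (line : String), Dom_compile_italic_underscore line → Spec_compile_italic_underscore line (compile_italic_underscore line)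

-- ===== LEMMAS AND PROOFS =====

lemma pvAScan_no_underscore (cs : List Char) (h : '_' ∉ cs) (i : Nat) (st : Option Nat × Option Nat) :
    pvAScan cs i st = st := by
  induction cs generalizing i with
  | nil => rfl
  | cons c rest ih =>
      obtain ⟨s, t⟩ := st
      have hc : c ≠ '_' := fun hc => h (hc ▸ List.mem_cons_self)
      simp only [pvAScan, if_neg hc]
      exact ih (fun hm => h (List.mem_cons_of_mem _ hm)) _

lemma pvAScan_last (mid rest : List Char) (h : '_' ∉ rest) (i s : Nat) (t : Option Nat) :
    pvAScan (mid ++ '_' :: rest) i (some s, t) = (some s, some (i + mid.length)) := by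
  induction mid generalizing i t with
  | nil =>
      simp only [List.nil_append, pvAScan, reduceIte]
      rw [pvAScan_no_underscore rest h]
      simp
  | cons c mid' ih =>
      by_cases hc : c = '_'
      · subst hc
        simp only [List.cons_append, pvAScan, reduceIte]
        rw [ih _ _]
        simp; omega
      · simp only [List.cons_append, pvAScan, if_neg hc]
        rw [ih _ _]
        simp; omega

lemma pvAScan_first (pre after : List Char) (h : '_' ∉ pre) (i : Nat) :
    pvAScan (pre ++ '_' :: after) i (none, none)
      = pvAScan after (i + pre.length + 1) (some (i + pre.length), none) := by
  induction pre generalizing i with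
  | nil => simp [pvAScan]
  | cons c pre' ih =>
      have hc : c ≠ '_' := fun hc => h (hc ▸ List.mem_cons_self)
      simp only [List.cons_append, pvAScan, if_neg hc]
      rw [ih (fun hm => h (List.mem_cons_of_mem _ hm)) (i+1)]
      congr 2 <;> simp <;> omega

lemma pvSplit_ne_nil (cs : List Char) : pvSplit cs ≠ [] := by
  cases cs with
  | nil => simp [pvSplit]
  | cons c cs =>
      simp only [pvSplit]
      split
      · simp
      · cases h : pvSplit cs <;> simp

lemma pvSplit_no_underscore (cs : List Char) (h : '_' ∉ cs) : pvSplit cs = [cs] := by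
  induction cs with
  | nil => rfl
  | cons c rest ih =>
      have hc : c ≠ '_' := fun hc => h (hc ▸ List.mem_cons_self)
      simp only [pvSplit, if_neg hc, ih (fun hm => h (List.mem_cons_of_mem _ hm))]

lemma pvSplit_append (xs ys : List Char) :
    pvSplit (xs ++ '_' :: ys) = pvSplit xs ++ pvSplit ys := by
  induction xs with
  | nil => simp [pvSplit]
  | cons c xs ih =>
      by_cases hc : c = '_'
      · subst hc
        simp only [List.cons_append, pvSplit, reduceIte, ih, List.cons_append]
      · simp only [List.cons_append, pvSplit, if_neg hc, ih]
        cases h : pvSplit xs with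
        | nil => exact absurd h (pvSplit_ne_nil xs)
        | cons p ps => simp

lemma pvJoin_pvSplit (cs : List Char) : pvJoinU (pvSplit cs) = cs := by
  induction cs with
  | nil => rfl
  | cons c rest ih =>
      by_cases hc : c = '_'
      · subst hc
        simp only [pvSplit, reduceIte]
        cases h : pvSplit rest with
        | nil => exact absurd h (pvSplit_ne_nil rest)
        | cons q qs =>
            rw [h] at ih
            simp only [pvJoinU, List.nil_append, ih]
      · simp only [pvSplit, if_neg hc]
        cases h : pvSplit rest with
        | nil => exact absurd h (pvSplit_ne_nil rest)
        | cons p ps =>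
            rw [h] at ih
            cases ps with
            | nil => simpa [pvJoinU] using ih
            | cons q qs =>
                simp only [pvJoinU] at ih ⊢
                simp [ih]

-- first-occurrence decomposition of any list
lemma first_split (cs : List Char) :
    '_' ∉ cs ∨ ∃ pre after, cs = pre ++ '_' :: after ∧ '_' ∉ pre := by
  induction cs with
  | nil => exact Or.inl (by simp)
  | cons c rest ih =>
      by_cases hc : c = '_'
      · exact Or.inr ⟨[], rest, by simp [hc], by simp⟩
      · rcases ih with h | ⟨pre, after, heq, hpre⟩
        · refine Or.inl ?_
          simp only [List.mem_cons, not_or]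
          exact ⟨fun e => hc e.symm, h⟩
        · refine Or.inr ⟨c :: pre, after, by simp [heq], ?_⟩
          simp only [List.mem_cons, not_or]
          exact ⟨fun e => hc e.symm, hpre⟩

-- last-occurrence decomposition, via first_split on the reverse
lemma last_split (cs : List Char) :
    '_' ∉ cs ∨ ∃ mid rest, cs = mid ++ '_' :: rest ∧ '_' ∉ rest := by
  rcases first_split cs.reverse with h | ⟨p, a, heq, hp⟩
  · exact Or.inl (fun hm => h (List.mem_reverse.mpr hm))
  · refine Or.inr ⟨a.reverse, p.reverse, ?_, fun hm => hp (List.mem_reverse.mp hm)⟩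
    have := congrArg List.reverse heq
    simpa using this

theorem main_equal (line : String) :
    compile_italic_underscore line = compile_italic_underscore_alt line := by
  unfold compile_italic_underscore compile_italic_underscore_alt
  rcases first_split line.toList with hno | ⟨pre, after, heq, hpre⟩
  · rw [pvAScan_no_underscore _ hno, pvSplit_no_underscore _ hno]
    simp
  · rcases last_split after with hno2 | ⟨mid, rest, heq2, hrest⟩
    · rw [heq]
      rw [pvAScan_first _ _ hpre, pvAScan_no_underscore _ hno2,
        pvSplit_append, pvSplit_no_underscore _ hpre, pvSplit_no_underscore _ hno2]
      simp
    · rw [heq, heq2]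
      rw [pvAScan_first _ _ hpre, pvAScan_last _ _ hrest,
        pvSplit_append, pvSplit_no_underscore _ hpre, pvSplit_append,
        pvSplit_no_underscore _ hrest]
      have hlen : ¬ (([pre] ++ (pvSplit mid ++ [rest])).length < 3) := by
        have := pvSplit_ne_nil mid
        have : 1 ≤ (pvSplit mid).length := by
          cases h : pvSplit mid with
          | nil => exact absurd h this
          | cons _ _ => simp
        simp only [List.length_append, List.length_cons, List.length_nil]
        omega
      rw [if_neg hlen]
      have hhead : ([pre] ++ (pvSplit mid ++ [rest])).headD [] = pre := by simp
      have hdrop : (([pre] ++ (pvSplit mid ++ [rest])).drop 1).dropLast = pvSplit mid := by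
        simp
      have hlast : ([pre] ++ (pvSplit mid ++ [rest])).getLastD [] = rest := by
        have he : [pre] ++ (pvSplit mid ++ [rest]) = (pre :: pvSplit mid) ++ [rest] := by simp
        rw [he, List.getLastD_concat]
      rw [hhead, hdrop, hlast, pvJoin_pvSplit]
      simp only [Nat.zero_add]
      have h1 : (pre ++ '_' :: (mid ++ '_' :: rest)).take pre.length = pre := by
        simp
      have h2 : (pre ++ '_' :: (mid ++ '_' :: rest)).drop (pre.length + 1)
          = mid ++ '_' :: rest := by
        have he : pre ++ '_' :: (mid ++ '_' :: rest) = (pre ++ ['_']) ++ (mid ++ '_' :: rest) := by simp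
        have hl : pre.length + 1 = (pre ++ ['_']).length := by simp
        rw [he, hl, List.drop_left]
      have h3 : (mid ++ '_' :: rest).take (pre.length + 1 + mid.length - (pre.length + 1)) = mid := by
        rw [show pre.length + 1 + mid.length - (pre.length + 1) = mid.length by omega]
        simp
      have h4 : (pre ++ '_' :: (mid ++ '_' :: rest)).drop (pre.length + 1 + mid.length + 1) = rest := by
        have he : pre ++ '_' :: (mid ++ '_' :: rest) = (pre ++ '_' :: mid ++ ['_']) ++ rest := by simp
        have hl : pre.length + 1 + mid.length + 1 = (pre ++ '_' :: mid ++ ['_']).length := by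
          simp; omega
        rw [he, hl, List.drop_left]
      show String.ofList ((pre ++ '_' :: (mid ++ '_' :: rest)).take pre.length ++ "<i>".toList
          ++ (((pre ++ '_' :: (mid ++ '_' :: rest)).drop (pre.length + 1)).take
                (pre.length + 1 + mid.length - (pre.length + 1)))
          ++ "</i>".toList
          ++ (pre ++ '_' :: (mid ++ '_' :: rest)).drop (pre.length + 1 + mid.length + 1)) = _
      rw [h1, h2, h3, h4]

-- ===== VERDICT =====
theorem compile_italic_underscore_spec : Claim_equal_compile_italic_underscore := by
  intro line _
  unfold Spec_compile_italic_underscore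
  exact main_equal line
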